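-- pv_equiv track=rewrite | github.com/shawinsoranakom/CodeSnippets | CollectedSnippets/ComplexMethod/cm042734.py | _looks_like_import_path
-- ===== SOURCE A (Python) =====
-- def _looks_like_import_path(value: str) -> bool:
--     """Return True if **value** looks like a valid Python import path or False
--     otherwise."""
--     if not value:
--         return False
--     if any(c.isspace() for c in value):
--         return False
--     allowed_chars = set(
--         "abcdefghijklmnopqrstuvwxyzABCDEFGHIJKLMNOPQRSTUVWXYZ0123456789_."
--     )
--     if any(c not in allowed_chars for c in value):
--         return False
--     if value[0] == "." or value[-1] == ".":
--         return False
--     parts = value.split(".")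
--     if any(part == "" for part in parts):
--         return False
--     return all(part.isidentifier() for part in parts)
-- ===== SOURCE B (Python) =====
-- def _looks_like_import_path(value: str) -> bool:
--     """Return True if **value** looks like a valid Python import path or False
--     otherwise."""
--     # Single anchored left-to-right scan of the pattern
--     #   [A-Za-z_][A-Za-z0-9_]* ( "." [A-Za-z_][A-Za-z0-9_]* )*
--     # need_start is True exactly when the next character must start a new
--     # identifier segment (at the beginning and right after each dot).
--     need_start = True
--     for c in value:
--         if need_start:
--             if not (c == '_' or 'a' <= c <= 'z' or 'A' <= c <= 'Z'):
--                 return False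
--             need_start = False
--         elif c == '.':
--             need_start = True
--         elif not (c == '_' or 'a' <= c <= 'z' or 'A' <= c <= 'Z' or '0' <= c <= '9'):
--             return False
--     return not need_start
-- ===== Notes on version B (the rewrite author's own statement) =====
-- stated objective: alternative
-- what changed: Replaced A's five separate passes (whitespace scan, allowed-set build + scan, first/last-dot checks, split('.') plus per-part isidentifier) by one left-to-right DFA scan of the anchored pattern [A-Za-z_][A-Za-z0-9_]*(\.[A-Za-z_][A-Za-z0-9_]*)* with a single need_start flag.
import Mathlib
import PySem

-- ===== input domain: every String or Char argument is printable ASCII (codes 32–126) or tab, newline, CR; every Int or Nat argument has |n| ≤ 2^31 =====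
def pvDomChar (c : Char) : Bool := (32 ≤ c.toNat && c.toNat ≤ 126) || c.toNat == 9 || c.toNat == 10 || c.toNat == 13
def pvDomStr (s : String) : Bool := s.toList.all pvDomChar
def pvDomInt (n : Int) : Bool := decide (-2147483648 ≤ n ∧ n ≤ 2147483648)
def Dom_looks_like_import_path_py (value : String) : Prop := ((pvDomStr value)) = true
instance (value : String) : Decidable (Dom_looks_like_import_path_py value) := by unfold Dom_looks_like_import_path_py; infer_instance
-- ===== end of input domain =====

-- B replaces A's five separate passes (empty/whitespace/allowed-set/edge-dot checks, then
-- split('.') + per-part isidentifier) by a single left-to-right scan with one needStart flag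
-- (a DFA for [A-Za-z_][A-Za-z0-9_]*(\.[A-Za-z_][A-Za-z0-9_]*)*); same O(n) cost, alternative structure.


-- ===== PORT A =====
-- the characters of A's allowed_chars set literal
def pvAllowedChars : List Char := "abcdefghijklmnopqrstuvwxyzABCDEFGHIJKLMNOPQRSTUVWXYZ0123456789_.".toList

-- hand port of str.isidentifier (no PySem primitive); exact on ASCII strings — A only calls
-- it after the allowed_chars check passes, so every argument is ASCII
def pvIsIdentifier (p : List Char) : Bool :=
  match p with
  | [] => false
  | c :: rest => (PySem.Chars.isalpha c || c == '_') && rest.all (fun d => PySem.Chars.isalnum d || d == '_')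

-- A's body, step for step, over the code points of value
def pvA (cs : List Char) : Bool :=
  if cs = [] then false
  else if cs.any (fun c => PySem.Chars.isspace c) then false
  else if cs.any (fun c => !(decide (c ∈ PySem.Set.ofList pvAllowedChars))) then false
  else if PySem.List.pyGet? cs 0 == some '.' || PySem.List.pyGet? cs (-1) == some '.' then false
  else
    let parts := PySem.Chars.splitOn cs ['.']
    if parts.any (fun p => decide (p = [])) then false
    else parts.all pvIsIdentifier

def looks_like_import_path_py (value : String) : Bool := pvA value.toList

-- ===== PORT B =====
def pvIdentStart (c : Char) : Bool := c == '_' || ('a' ≤ c && c ≤ 'z') || ('A' ≤ c && c ≤ 'Z')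

def pvIdentCont (c : Char) : Bool := pvIdentStart c || ('0' ≤ c && c ≤ '9')

-- the scan loop of Source B: needStart is true exactly when the next char must start a segment
def pvScan (needStart : Bool) (cs : List Char) : Bool :=
  match cs with
  | [] => !needStart
  | c :: rest =>
    if needStart then
      if pvIdentStart c then pvScan false rest else false
    else
      if c == '.' then pvScan true rest
      else if pvIdentCont c then pvScan false rest else false

def looks_like_import_path_py_alt (value : String) : Bool := pvScan true value.toList

-- ===== PRECONDITION & SPEC =====
def Spec_looks_like_import_path_py (value : String) (out : Bool) : Prop := out = looks_like_import_path_py_alt value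
instance (value : String) (out : Bool) : Decidable (Spec_looks_like_import_path_py value out) := by unfold Spec_looks_like_import_path_py; infer_instance

-- ===== CLAIM (what is proved, stated in full; the proofs are below) =====
def Claim_equal_looks_like_import_path_py : Prop := ∀ (value : String), Dom_looks_like_import_path_py value → Spec_looks_like_import_path_py value (looks_like_import_path_py value)

-- ===== LEMMAS AND PROOFS =====

-- reference one-pass split on '.': (first part, remaining parts)
def mySplitP : List Char → List Char × List (List Char)
  | [] => ([], [])
  | c :: rest =>
    let P := mySplitP rest
    if c == '.' then ([], P.1 :: P.2) else (c :: P.1, P.2)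

lemma mySplitP_dot (rest : List Char) :
    mySplitP ('.' :: rest) = ([], (mySplitP rest).1 :: (mySplitP rest).2) := by
  simp [mySplitP]

lemma mySplitP_cons (c : Char) (rest : List Char) (hc : c ≠ '.') :
    mySplitP (c :: rest) = (c :: (mySplitP rest).1, (mySplitP rest).2) := by
  simp [mySplitP, hc]

-- "nonempty segment" test in B's vocabulary
def pvIdentB (p : List Char) : Bool :=
  match p with
  | [] => false
  | c :: r => pvIdentStart c && r.all pvIdentCont

-- the per-character facts the equivalence needs, valid on the ASCII domain
abbrev pvCharFact (c : Char) : Prop :=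
  ((PySem.Chars.isalpha c || c == '_') = pvIdentStart c)
  ∧ ((PySem.Chars.isalnum c || c == '_') = pvIdentCont c)
  ∧ ((c ∈ pvAllowedChars) ↔ (pvIdentCont c || c == '.') = true)
  ∧ ((pvIdentCont c || c == '.') = true → PySem.Chars.isspace c = false)

set_option maxRecDepth 100000 in
lemma pvCharFact_lt : ∀ n : Nat, n < 128 → pvCharFact (Char.ofNat n) := by decide

lemma pvCharFact_dom (c : Char) (h : pvDomChar c = true) : pvCharFact c := by
  have h1 : c.toNat < 128 := by
    unfold pvDomChar at h
    simp only [Bool.or_eq_true, Bool.and_eq_true, decide_eq_true_eq, beq_iff_eq] at h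
    rcases h with ((⟨h1, h2⟩ | h) | h) | h <;> omega
  have := pvCharFact_lt c.toNat h1
  rwa [Char.ofNat_toNat] at this

-- splitOn.go with enough fuel computes mySplitP (sep = ".")
lemma pvGo_spec : ∀ (fuel : Nat) (l cur : List Char) (acc : List (List Char)),
    l.length < fuel →
    PySem.Chars.splitOn.go ['.'] fuel l cur acc
      = acc.reverse ++ (cur.reverse ++ (mySplitP l).1) :: (mySplitP l).2 := by
  intro fuel
  induction fuel with
  | zero => intro l cur acc h; omega
  | succ fuel ih =>
    intro l cur acc h
    cases l with
    | nil => simp [PySem.Chars.splitOn.go, mySplitP]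
    | cons c rest =>
      by_cases hc : c = '.'
      · subst hc
        have hpre : List.isPrefixOf ['.'] ('.' :: rest) = true := by
          simp [List.isPrefixOf]
        rw [PySem.Chars.splitOn.go]
        simp only [hpre, if_true]
        have hdrop : List.drop (['.'] : List Char).length ('.' :: rest) = rest := rfl
        rw [hdrop, ih rest [] (cur.reverse :: acc) (by simpa using Nat.lt_of_succ_lt_succ h)]
        simp [mySplitP_dot]
      · have hpre : List.isPrefixOf ['.'] (c :: rest) = false := by
          simp [List.isPrefixOf]
          intro h'; exact absurd h'.symm hc
        rw [PySem.Chars.splitOn.go]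
        simp only [hpre, Bool.false_eq_true, if_false]
        rw [ih rest (c :: cur) acc (by simpa using Nat.lt_of_succ_lt_succ h)]
        simp [mySplitP_cons c rest hc]

lemma pvSplitOn_eq (cs : List Char) :
    PySem.Chars.splitOn cs ['.'] = (mySplitP cs).1 :: (mySplitP cs).2 := by
  unfold PySem.Chars.splitOn
  rw [pvGo_spec (cs.length + 1) cs [] [] (by omega)]
  simp

-- B's scan computed over the parts of mySplitP
lemma pvScan_spec : ∀ cs : List Char,
    pvScan true cs = (pvIdentB (mySplitP cs).1 && ((mySplitP cs).2).all pvIdentB)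
    ∧ pvScan false cs = ((mySplitP cs).1.all pvIdentCont && ((mySplitP cs).2).all pvIdentB) := by
  intro cs
  induction cs with
  | nil => simp [pvScan, mySplitP, pvIdentB]
  | cons c rest ih =>
    obtain ⟨ih1, ih2⟩ := ih
    by_cases hc : c = '.'
    · subst hc
      have hds : pvIdentStart '.' = false := by decide
      refine ⟨?_, ?_⟩
      · simp [pvScan, mySplitP_dot, pvIdentB, hds]
      · simp [pvScan, mySplitP_dot, ih1]
    · by_cases hstart : pvIdentStart c = true
      · have hcont : pvIdentCont c = true := by simp [pvIdentCont, hstart]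
        refine ⟨?_, ?_⟩
        · simp [pvScan, mySplitP_cons _ _ hc, hstart, ih2, pvIdentB]
        · simp [pvScan, mySplitP_cons _ _ hc, hc, hcont, ih2]
      · by_cases hcont : pvIdentCont c = true
        · refine ⟨?_, ?_⟩
          · simp [pvScan, mySplitP_cons _ _ hc, hstart, pvIdentB]
          · simp [pvScan, mySplitP_cons _ _ hc, hc, hcont, ih2]
        · refine ⟨?_, ?_⟩
          · simp [pvScan, mySplitP_cons _ _ hc, hstart, pvIdentB]
          · simp [pvScan, mySplitP_cons _ _ hc, hc, hcont]

-- a character that can appear nowhere in the pattern kills the scan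
lemma pvScan_bad : ∀ (cs : List Char) (b : Bool) (c : Char),
    c ∈ cs → pvIdentCont c = false → c ≠ '.' → pvScan b cs = false := by
  intro cs
  induction cs with
  | nil => intro b c h; cases h
  | cons d rest ih =>
    intro b c hmem hcont hne
    have hsof : ∀ x : Char, pvIdentCont x = false → pvIdentStart x = false := by
      intro x hx
      unfold pvIdentCont at hx
      exact (Bool.or_eq_false_iff.mp hx).1
    rcases List.mem_cons.mp hmem with rfl | hmem'
    · cases b <;> simp [pvScan, hsof c hcont, hcont, hne]
    · cases b <;> simp only [pvScan] <;> split_ifs <;>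
        first | rfl | exact ih _ _ hmem' hcont hne

-- every character of every part came from the input
lemma mySplitP_mem : ∀ (cs : List Char) (c : Char),
    (c ∈ (mySplitP cs).1 ∨ ∃ p ∈ (mySplitP cs).2, c ∈ p) → c ∈ cs := by
  intro cs
  induction cs with
  | nil => intro c h; simp [mySplitP] at h
  | cons d rest ih =>
    intro c h
    by_cases hd : d = '.'
    · subst hd
      rw [mySplitP_dot] at h
      rcases h with h | ⟨p, hp, hcp⟩
      · simp at h
      · rcases List.mem_cons.mp hp with rfl | hp'
        · exact List.mem_cons_of_mem _ (ih c (Or.inl hcp))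
        · exact List.mem_cons_of_mem _ (ih c (Or.inr ⟨p, hp', hcp⟩))
    · rw [mySplitP_cons d rest hd] at h
      rcases h with h | ⟨p, hp, hcp⟩
      · rcases List.mem_cons.mp h with rfl | h'
        · exact List.mem_cons_self
        · exact List.mem_cons_of_mem _ (ih c (Or.inl h'))
      · exact List.mem_cons_of_mem _ (ih c (Or.inr ⟨p, hp, hcp⟩))

-- a trailing dot leaves an empty last part
lemma mySplitP_last : ∀ cs : List Char, cs.getLast? = some '.' → [] ∈ (mySplitP cs).2 := by
  intro cs
  induction cs with
  | nil => intro h; simp at h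
  | cons c rest ih =>
    intro h
    cases rest with
    | nil =>
      simp only [List.getLast?_singleton, Option.some.injEq] at h
      subst h
      simp [mySplitP]
    | cons d t =>
      have h' : (d :: t).getLast? = some '.' := by
        rwa [List.getLast?_cons_cons] at h
      have hmem := ih h'
      by_cases hc : c = '.'
      · subst hc
        rw [mySplitP_dot]
        exact List.mem_cons_of_mem _ hmem
      · rw [mySplitP_cons c _ hc]
        exact hmem

-- our all-congruence over members (pointwise-equal predicates)
lemma pvAllCongr {α : Type} (l : List α) (f g : α → Bool)
    (h : ∀ a ∈ l, f a = g a) : l.all f = l.all g := by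
  induction l with
  | nil => rfl
  | cons a t ih =>
    simp only [List.all_cons, h a List.mem_cons_self,
      ih (fun x hx => h x (List.mem_cons_of_mem _ hx))]

-- a list of parts containing an empty part fails B's all-test
lemma pvAllB_false_of_mem_nil (l : List (List Char)) (h : [] ∈ l) : l.all pvIdentB = false := by
  cases hx : l.all pvIdentB
  · rfl
  · have := List.all_eq_true.mp hx [] h
    simp [pvIdentB] at this

-- A's isidentifier test equals B's segment test on ASCII-fact characters
lemma pvIdentEq (p : List Char) (h : ∀ c ∈ p, pvCharFact c) :
    pvIsIdentifier p = pvIdentB p := by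
  cases p with
  | nil => rfl
  | cons c r =>
    have hc := h c List.mem_cons_self
    simp only [pvIsIdentifier, pvIdentB, hc.1]
    congr 1
    apply pvAllCongr
    intro d hd
    exact (h d (List.mem_cons_of_mem _ hd)).2.1

-- the main equivalence over code-point lists
lemma pvMain : ∀ cs : List Char, (∀ c ∈ cs, pvDomChar c = true) →
    pvA cs = pvScan true cs := by
  intro cs hdom
  have hfact : ∀ c ∈ cs, pvCharFact c := fun c hc => pvCharFact_dom c (hdom c hc)
  by_cases hbad : ∃ c ∈ cs, ¬ ((pvIdentCont c || c == '.') = true)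
  · obtain ⟨c, hc, hnb⟩ := hbad
    rw [Bool.or_eq_true, not_or] at hnb
    obtain ⟨hcont', hne'⟩ := hnb
    have hcont : pvIdentCont c = false := by
      cases hx : pvIdentCont c
      · rfl
      · exact absurd hx hcont'
    have hne : c ≠ '.' := by
      intro hx; exact hne' (by simp [hx])
    have hB : pvScan true cs = false := pvScan_bad cs true c hc hcont hne
    have hA3 : cs.any (fun c => !(decide (c ∈ PySem.Set.ofList pvAllowedChars))) = true := by
      refine List.any_eq_true.mpr ⟨c, hc, ?_⟩
      have h3 := (hfact c hc).2.2.1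
      have hnm : c ∉ pvAllowedChars := by
        intro hm
        have := h3.mp hm
        rw [Bool.or_eq_true] at this
        rcases this with hx | hx
        · rw [hcont] at hx; exact Bool.false_ne_true hx
        · exact hne (by simpa using hx)
      simp [PySem.Set.mem_ofList, hnm]
    unfold pvA
    split_ifs <;> exact hB.symm
  · have hgood : ∀ c ∈ cs, (pvIdentCont c || c == '.') = true := by
      intro c hc
      by_contra hx
      exact hbad ⟨c, hc, hx⟩
    clear hbad
    rcases cs with _ | ⟨a, rest⟩
    · simp [pvA, pvScan]
    · have hsp : (a :: rest).any (fun c => PySem.Chars.isspace c) = false := by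
        rw [List.any_eq_false]
        intro c hc
        simp [(hfact c hc).2.2.2 (hgood c hc)]
      have hal : (a :: rest).any (fun c => !(decide (c ∈ PySem.Set.ofList pvAllowedChars))) = false := by
        rw [List.any_eq_false]
        intro c hc
        have hmem : c ∈ pvAllowedChars := ((hfact c hc).2.2.1).mpr (hgood c hc)
        simp [PySem.Set.mem_ofList, hmem]
      have hsplit := pvSplitOn_eq (a :: rest)
      have hscan := (pvScan_spec (a :: rest)).1
      have hparts : ∀ p, (p = (mySplitP (a :: rest)).1 ∨ p ∈ (mySplitP (a :: rest)).2) →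
          pvIsIdentifier p = pvIdentB p := by
        intro p hp
        apply pvIdentEq
        intro c hcp
        apply hfact
        apply mySplitP_mem
        rcases hp with rfl | hp'
        · exact Or.inl hcp
        · exact Or.inr ⟨p, hp', hcp⟩
      unfold pvA
      rw [if_neg (show ¬(a :: rest) = [] by simp),
          if_neg (show ¬((a :: rest).any fun c => PySem.Chars.isspace c) = true by simp [hsp]),
          if_neg (show ¬((a :: rest).any fun c => !(decide (c ∈ PySem.Set.ofList pvAllowedChars))) = true by
            simp only [hal, Bool.false_eq_true, not_false_eq_true])]
      by_cases hdot :
          (PySem.List.pyGet? (a :: rest) 0 == some '.' || PySem.List.pyGet? (a :: rest) (-1) == some '.') = true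
      · -- a leading or trailing dot: B also rejects
        rw [if_pos hdot, hscan]
        rw [Bool.or_eq_true] at hdot
        rcases hdot with hx | hx
        · have ha : a = '.' := by
            rw [PySem.List.pyGet?_zero_cons] at hx
            simpa using hx
          subst ha
          rw [mySplitP_dot]
          simp [pvIdentB]
        · have hlast : (a :: rest).getLast? = some '.' := by
            rw [PySem.List.pyGet?_neg_one] at hx
            simpa using hx
          rw [pvAllB_false_of_mem_nil _ (mySplitP_last _ hlast)]
          simp
      · rw [if_neg hdot]
        simp only [hsplit]
        by_cases hemp :
            (((mySplitP (a :: rest)).1 :: (mySplitP (a :: rest)).2).any fun p => decide (p = [])) = true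
        · -- an empty part: B also rejects
          rw [if_pos hemp, hscan]
          obtain ⟨p, hp, he⟩ := List.any_eq_true.mp hemp
          have hpe : p = [] := by simpa using he
          subst hpe
          rcases List.mem_cons.mp hp with h0 | h0
          · rw [← h0]
            simp [pvIdentB]
          · rw [pvAllB_false_of_mem_nil _ h0]
            simp
        · -- all checks pass: the part-wise tests coincide
          rw [if_neg hemp, hscan, List.all_cons, hparts _ (Or.inl rfl),
            pvAllCongr ((mySplitP (a :: rest)).2) pvIsIdentifier pvIdentB
              (fun p hp => hparts p (Or.inr hp))]

-- ===== VERDICT (by name: the statement is the Claim_ definition above) =====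
theorem looks_like_import_path_py_spec : Claim_equal_looks_like_import_path_py := by
  intro value hdom
  unfold Spec_looks_like_import_path_py looks_like_import_path_py looks_like_import_path_py_alt
  apply pvMain
  intro c hc
  have hd : pvDomStr value = true := hdom
  unfold pvDomStr at hd
  rw [List.all_eq_true] at hd
  exact hd c hc
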